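-- pv_equiv track=rewrite | github.com/vvkin/discrete-math | LAB_1/source.py | get_incidence_matrix_nor
-- ===== SOURCE A (Python) =====
-- def get_incidence_matrix_nor(edges_list, vertex_num):  # Отримання матриці інцидентності(неорієнтований)
--     inc_matrix = [[0] * len(edges_list) for j in range(vertex_num)]
--     edge_number = 0
--     for edge in edges_list:
--         start, finish = edge[0] - 1, edge[1] - 1
--         inc_matrix[start][edge_number] = 1
--         inc_matrix[finish][edge_number] = 1
--         edge_number += 1
--     return inc_matrix
-- ===== SOURCE B (Python) =====
-- def get_incidence_matrix_nor(edges_list, vertex_num):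
--     # First index each vertex's incident edges, then emit the rows from that index.
--     incident = [[] for _ in range(vertex_num)]
--     for j, edge in enumerate(edges_list):
--         incident[edge[0] - 1].append(j)
--         incident[edge[1] - 1].append(j)
--     rows = []
--     for cols in incident:
--         row = [0] * len(edges_list)
--         for j in cols:
--             row[j] = 1
--         rows.append(row)
--     return rows
-- ===== Notes on version B (the rewrite author's own statement) =====
-- stated objective: alternative
-- what changed: Instead of allocating the V x E matrix up front and mutating two cells per edge with a running column counter, B first builds a vertex-to-incident-edge-index adjacency list and then constructs each row from that index in a second pass; Pre_ excludes inputs on which A raises IndexError (an endpoint outside the indexable row range).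
import Mathlib
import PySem

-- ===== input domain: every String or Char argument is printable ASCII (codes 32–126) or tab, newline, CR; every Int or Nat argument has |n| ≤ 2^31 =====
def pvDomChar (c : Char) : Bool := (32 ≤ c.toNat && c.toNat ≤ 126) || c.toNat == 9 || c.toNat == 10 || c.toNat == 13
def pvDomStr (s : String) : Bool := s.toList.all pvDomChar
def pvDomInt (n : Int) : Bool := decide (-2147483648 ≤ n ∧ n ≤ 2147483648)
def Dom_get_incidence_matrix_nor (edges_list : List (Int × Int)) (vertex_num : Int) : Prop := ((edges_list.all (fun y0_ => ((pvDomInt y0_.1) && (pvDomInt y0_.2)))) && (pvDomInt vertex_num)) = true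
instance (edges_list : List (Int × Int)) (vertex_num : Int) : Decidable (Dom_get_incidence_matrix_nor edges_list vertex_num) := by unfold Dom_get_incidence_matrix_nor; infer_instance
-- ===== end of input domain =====

-- B first indexes each vertex's incident edge numbers (an adjacency pass over enumerate),
-- then emits each row from that index, instead of mutating a pre-allocated V x E matrix
-- in place with a running column counter.


-- ===== PORT A =====
-- inc_matrix[i][c] = 1 for a possibly negative Python index i: wrap a negative index by the
-- list length, then modify that row in place; out-of-range is IndexError (excluded by Pre_).
-- Hand-ported (exact on indices where the Python assignment succeeds).
def pvMark (m : List (List Int)) (i : Int) (c : Int) : List (List Int) :=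
  let j := if i < 0 then i + (m.length : Int) else i
  if 0 ≤ j ∧ j < (m.length : Int) then
    m.modify j.toNat (fun r => PySem.List.pySetD r c 1)
  else m

def get_incidence_matrix_nor (edges_list : List (Int × Int)) (vertex_num : Int) : List (List Int) :=
  let inc_matrix := (PySem.List.pyRange 0 vertex_num 1).map
    (fun _ => List.replicate edges_list.length (0 : Int))
  (edges_list.foldl (fun (st : List (List Int) × Int) edge =>
      let start := edge.1 - 1
      let finish := edge.2 - 1
      let m1 := pvMark st.1 start st.2
      let m2 := pvMark m1 finish st.2
      (m2, st.2 + 1)) (inc_matrix, (0 : Int))).1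

-- ===== PORT B =====
-- incident[i].append(j) for a possibly negative Python index i: wrap by the list length,
-- then append in place; out-of-range is IndexError (excluded by Pre_).
def pvAppendAt (m : List (List Int)) (i : Int) (x : Int) : List (List Int) :=
  let j := if i < 0 then i + (m.length : Int) else i
  if 0 ≤ j ∧ j < (m.length : Int) then
    m.modify j.toNat (fun r => r ++ [x])
  else m

-- [0]*len(edges_list) per row; row[j] = 1 (Python assignment = PySem.List.pySetD, exact under Pre_)
def get_incidence_matrix_nor_alt (edges_list : List (Int × Int)) (vertex_num : Int) : List (List Int) :=
  let incident := (PySem.List.enumerate edges_list).foldl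
    (fun inc je => pvAppendAt (pvAppendAt inc (je.2.1 - 1) je.1) (je.2.2 - 1) je.1)
    ((PySem.List.pyRange 0 vertex_num 1).map (fun _ => ([] : List Int)))
  incident.map (fun cols =>
    cols.foldl (fun row j => PySem.List.pySetD row j 1)
      (List.replicate edges_list.length (0 : Int)))

-- ===== PRECONDITION & SPEC =====
-- A raises IndexError exactly when some endpoint-1 falls outside the indexable row range
-- [-vertex_num, vertex_num); Pre_ admits precisely the inputs on which A returns.
def Pre_get_incidence_matrix_nor (edges_list : List (Int × Int)) (vertex_num : Int) : Prop :=
  ∀ e ∈ edges_list,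
    (-vertex_num ≤ e.1 - 1 ∧ e.1 - 1 < vertex_num) ∧
    (-vertex_num ≤ e.2 - 1 ∧ e.2 - 1 < vertex_num)
instance (edges_list : List (Int × Int)) (vertex_num : Int) : Decidable (Pre_get_incidence_matrix_nor edges_list vertex_num) := by unfold Pre_get_incidence_matrix_nor; infer_instance

def pvWitness_get_incidence_matrix_nor : (List (Int × Int)) × Int := ([(1, 2), (2, 3), (3, 1)], 3)

def Spec_get_incidence_matrix_nor (edges_list : List (Int × Int)) (vertex_num : Int) (out : List (List Int)) : Prop := out = get_incidence_matrix_nor_alt edges_list vertex_num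
instance (edges_list : List (Int × Int)) (vertex_num : Int) (out : List (List Int)) : Decidable (Spec_get_incidence_matrix_nor edges_list vertex_num out) := by unfold Spec_get_incidence_matrix_nor; infer_instance

-- ===== CLAIM (what is proved, stated in full; the proofs are below) =====
def Claim_equal_get_incidence_matrix_nor : Prop := ∀ (edges_list : List (Int × Int)) (vertex_num : Int), Dom_get_incidence_matrix_nor edges_list vertex_num → Pre_get_incidence_matrix_nor edges_list vertex_num → Spec_get_incidence_matrix_nor edges_list vertex_num (get_incidence_matrix_nor edges_list vertex_num)

-- ===== LEMMAS AND PROOFS =====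

-- the wrapped row index a valid Python index lands on
def pvWrap (n : Int) (i : Int) : Int := if i < 0 then i + n else i

lemma pvWrap_range (n i : Int) (h1 : -n ≤ i) (h2 : i < n) :
    0 ≤ pvWrap n i ∧ pvWrap n i < n := by
  unfold pvWrap; split_ifs <;> omega

-- pvMark on a range-indexed matrix rewrites one row, functionally
lemma pvMark_map_range (n : Int) (hn : 1 ≤ n) (g : Int → List Int) (i c : Int)
    (h1 : -n ≤ i) (h2 : i < n) :
    pvMark ((PySem.List.pyRange 0 n 1).map g) i c
      = (PySem.List.pyRange 0 n 1).map
          (fun v => if v = pvWrap n i then PySem.List.pySetD (g v) c 1 else g v) := by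
  unfold pvMark
  have hL : ((((PySem.List.pyRange 0 n 1).map g).length : Nat) : Int) = n := by
    simp [PySem.List.length_pyRange_one]; omega
  simp only [hL]
  have hjw : (if i < 0 then i + n else i) = pvWrap n i := rfl
  rw [hjw]
  rw [if_pos (pvWrap_range n i h1 h2)]
  apply List.ext_getElem
  · simp [PySem.List.length_pyRange_one]
  intro p hp1 hp2
  rw [List.getElem_modify]
  simp only [List.getElem_map, PySem.List.getElem_pyRange_one, zero_add]
  have hp : (p : Int) < n := by
    have := hp2
    simp [PySem.List.length_pyRange_one] at this
    omega
  by_cases hc : (p : Int) = pvWrap n i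
  · rw [if_pos (by omega), if_pos hc]
  · rw [if_neg (by omega), if_neg hc]

lemma pvSet_append_len {a : Type} (pre : List a) (x : a) (rest : List a) (v : a) :
    (pre ++ x :: rest).set pre.length v = pre ++ v :: rest := by
  induction pre with
  | nil => rfl
  | cons h t ih => simp [ih]

-- one cell of the result, as A computes it
def pvCell (n : Int) (v : Int) (e : Int × Int) : Int :=
  if pvWrap n (e.1 - 1) = v ∨ pvWrap n (e.2 - 1) = v then 1 else 0

lemma pvFold_spec (n : Int) (es : List (Int × Int))
    (hPre : ∀ e ∈ es, (-n ≤ e.1 - 1 ∧ e.1 - 1 < n) ∧ (-n ≤ e.2 - 1 ∧ e.2 - 1 < n))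
    (pre : Int → List Int) (k : Nat) (hk : ∀ v, (pre v).length = k) :
    (es.foldl (fun (st : List (List Int) × Int) edge =>
        let start := edge.1 - 1
        let finish := edge.2 - 1
        let m1 := pvMark st.1 start st.2
        let m2 := pvMark m1 finish st.2
        (m2, st.2 + 1))
      ((PySem.List.pyRange 0 n 1).map (fun v => pre v ++ List.replicate es.length 0), (k : Int))).1
    = (PySem.List.pyRange 0 n 1).map (fun v => pre v ++ es.map (pvCell n v)) := by
  induction es generalizing pre k with
  | nil => simp
  | cons e es' ih =>
    obtain ⟨⟨ha1, ha2⟩, hb1, hb2⟩ := hPre e (by simp)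
    have hn : (1:Int) ≤ n := by omega
    rw [List.foldl_cons]
    simp only [List.length_cons, List.replicate_succ]
    rw [pvMark_map_range n hn _ _ _ ha1 ha2, pvMark_map_range n hn _ _ _ hb1 hb2]
    have hcell : (fun v => if v = pvWrap n (e.2 - 1) then
          PySem.List.pySetD (if v = pvWrap n (e.1 - 1) then
              PySem.List.pySetD (pre v ++ 0 :: List.replicate es'.length 0) (k : Int) 1
            else pre v ++ 0 :: List.replicate es'.length 0) (k : Int) 1
        else if v = pvWrap n (e.1 - 1) then
          PySem.List.pySetD (pre v ++ 0 :: List.replicate es'.length 0) (k : Int) 1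
        else pre v ++ 0 :: List.replicate es'.length 0)
        = (fun v => (pre v ++ [pvCell n v e]) ++ List.replicate es'.length 0) := by
      funext v
      have hset : ∀ x : Int,
          PySem.List.pySetD (pre v ++ x :: List.replicate es'.length 0) (k : Int) 1
            = pre v ++ (1:Int) :: List.replicate es'.length 0 := by
        intro x
        rw [PySem.List.pySetD_natCast, ← hk v, pvSet_append_len]
      simp only [pvCell]
      by_cases h2 : v = pvWrap n (e.2 - 1) <;> by_cases h1 : v = pvWrap n (e.1 - 1)
      · rw [if_pos h2, if_pos h1, hset, hset]; simp [h1.symm]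
      · rw [if_pos h2, if_neg h1, hset]; simp [h2.symm]
      · rw [if_neg h2, if_pos h1, hset]; simp [h1.symm]
      · rw [if_neg h2, if_neg h1]; simp [Ne.symm h1, Ne.symm h2]
    rw [hcell]
    have hstep := ih (fun e' he' => hPre e' (List.mem_cons_of_mem _ he'))
      (fun v => pre v ++ [pvCell n v e]) (k + 1)
      (by intro v; simp [hk v])
    have hcast : ((k : Int) + 1) = ((k + 1 : Nat) : Int) := by push_cast; ring
    rw [hcast, hstep]
    simp

-- B-side: pvAppendAt on a range-indexed matrix rewrites one row, functionally
lemma pvAppendAt_map_range (n : Int) (hn : 1 ≤ n) (g : Int → List Int) (i x : Int)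
    (h1 : -n ≤ i) (h2 : i < n) :
    pvAppendAt ((PySem.List.pyRange 0 n 1).map g) i x
      = (PySem.List.pyRange 0 n 1).map
          (fun v => if v = pvWrap n i then g v ++ [x] else g v) := by
  unfold pvAppendAt
  have hL : ((((PySem.List.pyRange 0 n 1).map g).length : Nat) : Int) = n := by
    simp [PySem.List.length_pyRange_one]; omega
  simp only [hL]
  have hjw : (if i < 0 then i + n else i) = pvWrap n i := rfl
  rw [hjw]
  rw [if_pos (pvWrap_range n i h1 h2)]
  apply List.ext_getElem
  · simp [PySem.List.length_pyRange_one]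
  intro p hp1 hp2
  rw [List.getElem_modify]
  simp only [List.getElem_map, PySem.List.getElem_pyRange_one, zero_add]
  have hp : (p : Int) < n := by
    have := hp2
    simp [PySem.List.length_pyRange_one] at this
    omega
  by_cases hc : (p : Int) = pvWrap n i
  · rw [if_pos (by omega), if_pos hc]
  · rw [if_neg (by omega), if_neg hc]

-- the edge indices B's adjacency pass appends to row v, starting the counter at k
def pvColsOf (n v : Int) (es : List (Int × Int)) (k : Int) : List Int :=
  match es with
  | [] => []
  | e :: es' =>
      ((if pvWrap n (e.1 - 1) = v then [k] else []) ++
       (if pvWrap n (e.2 - 1) = v then [k] else [])) ++ pvColsOf n v es' (k + 1)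

lemma pvIncFold_spec (n : Int) (es : List (Int × Int))
    (hPre : ∀ e ∈ es, (-n ≤ e.1 - 1 ∧ e.1 - 1 < n) ∧ (-n ≤ e.2 - 1 ∧ e.2 - 1 < n))
    (pre : Int → List Int) (k : Int) :
    ((PySem.List.enumerate es k).foldl
        (fun inc je => pvAppendAt (pvAppendAt inc (je.2.1 - 1) je.1) (je.2.2 - 1) je.1)
        ((PySem.List.pyRange 0 n 1).map pre))
      = (PySem.List.pyRange 0 n 1).map (fun v => pre v ++ pvColsOf n v es k) := by
  induction es generalizing pre k with
  | nil => simp [pvColsOf]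
  | cons e es' ih =>
    obtain ⟨⟨ha1, ha2⟩, hb1, hb2⟩ := hPre e (by simp)
    have hn : (1:Int) ≤ n := by omega
    rw [PySem.List.enumerate_cons, List.foldl_cons]
    simp only
    rw [pvAppendAt_map_range n hn _ _ _ ha1 ha2, pvAppendAt_map_range n hn _ _ _ hb1 hb2]
    have hcell : (fun v => if v = pvWrap n (e.2 - 1) then
          (if v = pvWrap n (e.1 - 1) then pre v ++ [k] else pre v) ++ [k]
        else if v = pvWrap n (e.1 - 1) then pre v ++ [k] else pre v)
        = (fun v => pre v ++ ((if pvWrap n (e.1 - 1) = v then [k] else []) ++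
            (if pvWrap n (e.2 - 1) = v then [k] else []))) := by
      funext v
      by_cases h2 : v = pvWrap n (e.2 - 1) <;> by_cases h1 : v = pvWrap n (e.1 - 1)
      · rw [if_pos h2, if_pos h1, if_pos h1.symm, if_pos h2.symm]; simp
      · rw [if_pos h2, if_neg h1, if_neg (fun hh => h1 hh.symm), if_pos h2.symm]; simp
      · rw [if_neg h2, if_pos h1, if_pos h1.symm, if_neg (fun hh => h2 hh.symm)]; simp
      · rw [if_neg h2, if_neg h1, if_neg (fun hh => h1 hh.symm), if_neg (fun hh => h2 hh.symm)]
        simp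
    rw [hcell, ih (fun e' he' => hPre e' (List.mem_cons_of_mem _ he'))]
    refine List.map_congr_left (fun v _ => ?_)
    simp [pvColsOf, List.append_assoc]

lemma mem_pvColsOf (n v : Int) (es : List (Int × Int)) (k j : Int) :
    j ∈ pvColsOf n v es k ↔ ∃ (p : Nat) (_ : p < es.length), j = k + p ∧
      (pvWrap n (es[p].1 - 1) = v ∨ pvWrap n (es[p].2 - 1) = v) := by
  induction es generalizing k with
  | nil => simp [pvColsOf]
  | cons e es' ih =>
    simp only [pvColsOf]
    constructor
    · intro h
      rcases List.mem_append.1 h with hh | ht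
      · rcases List.mem_append.1 hh with h1 | h2
        · by_cases hw : pvWrap n (e.1 - 1) = v
          · refine ⟨0, by simp, ?_, ?_⟩
            · rw [if_pos hw] at h1
              have : j = k := by simpa using h1
              simpa using this
            · simpa using Or.inl hw
          · rw [if_neg hw] at h1; simp at h1
        · by_cases hw : pvWrap n (e.2 - 1) = v
          · refine ⟨0, by simp, ?_, ?_⟩
            · rw [if_pos hw] at h2
              have : j = k := by simpa using h2
              simpa using this
            · simpa using Or.inr hw
          · rw [if_neg hw] at h2; simp at h2
      · rcases (ih (k + 1)).1 ht with ⟨p, hp, hj, hc⟩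
        exact ⟨p + 1, by simpa using hp, by push_cast at hj ⊢; omega,
          by simpa [List.getElem_cons_succ] using hc⟩
    · rintro ⟨p, hp, hj, hc⟩
      match p, hp, hj, hc with
      | 0, hp, hj, hc =>
        simp only [List.getElem_cons_zero] at hc
        have hjk : j = k := by simpa using hj
        rcases hc with hc | hc
        · exact List.mem_append.2 (Or.inl (List.mem_append.2 (Or.inl (by simp [hjk, hc]))))
        · exact List.mem_append.2 (Or.inl (List.mem_append.2 (Or.inr (by simp [hjk, hc]))))
      | p' + 1, hp, hj, hc =>
        refine List.mem_append.2 (Or.inr ((ih (k + 1)).2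
          ⟨p', by simpa using hp, by push_cast at hj ⊢; omega,
            by simpa [List.getElem_cons_succ] using hc⟩))

lemma foldl_pySetD_getD (cols : List Int) (row : List Int)
    (hcols : ∀ j ∈ cols, 0 ≤ j ∧ j < (row.length : Int)) (p : Nat) :
    (cols.foldl (fun r j => PySem.List.pySetD r j 1) row).getD p 0
      = if (p : Int) ∈ cols then 1 else row.getD p 0 := by
  induction cols generalizing row with
  | nil => simp
  | cons c cs ih =>
    obtain ⟨hc0, hcl⟩ := hcols c (by simp)
    rw [List.foldl_cons, PySem.List.pySetD_of_nonneg _ _ hc0]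
    rw [ih _ (by intro j hj; have := hcols j (List.mem_cons_of_mem _ hj); simpa using this)]
    by_cases hmem : (p : Int) ∈ cs
    · simp [hmem]
    · rw [if_neg hmem]
      by_cases hpc : (p : Int) = c
      · have hpl : p < row.length := by omega
        have hcp : c.toNat = p := by omega
        rw [if_pos (by simp [hpc]), List.getD_eq_getElem _ _ (by simpa using hpl),
          List.getElem_set, if_pos hcp]
      · rw [if_neg (by simp [hpc, hmem])]
        by_cases hpl : p < row.length
        · rw [List.getD_eq_getElem _ _ (by simpa using hpl),
            List.getD_eq_getElem _ _ hpl, List.getElem_set, if_neg (by omega)]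
        · rw [List.getD_eq_default _ _ (by simpa using hpl),
            List.getD_eq_default _ _ (by simpa using hpl)]

lemma foldl_pySetD_length (cols : List Int) (row : List Int)
    (hcols : ∀ j ∈ cols, 0 ≤ j) :
    (cols.foldl (fun r j => PySem.List.pySetD r j 1) row).length = row.length := by
  induction cols generalizing row with
  | nil => rfl
  | cons c cs ih =>
    rw [List.foldl_cons, PySem.List.pySetD_of_nonneg _ _ (hcols c (by simp)),
      ih _ (fun j hj => hcols j (List.mem_cons_of_mem _ hj))]
    simp

-- B's row for vertex v is A's row of cells
lemma pvRow_eq (n : Int) (es : List (Int × Int)) (v : Int) :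
    (pvColsOf n v es 0).foldl (fun row j => PySem.List.pySetD row j 1)
        (List.replicate es.length (0 : Int))
      = es.map (pvCell n v) := by
  have hb : ∀ j ∈ pvColsOf n v es 0, 0 ≤ j ∧ j < ((List.replicate es.length (0 : Int)).length : Int) := by
    intro j hj
    rcases (mem_pvColsOf n v es 0 j).1 hj with ⟨p, hp, hj, _⟩
    simp; omega
  apply List.ext_getElem
  · rw [foldl_pySetD_length _ _ (fun j hj => (hb j hj).1)]; simp
  intro p hp1 hp2
  have hpe : p < es.length := by
    have := hp1
    rw [foldl_pySetD_length _ _ (fun j hj => (hb j hj).1)] at this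
    simpa using this
  rw [← List.getD_eq_getElem _ 0 hp1, foldl_pySetD_getD _ _ hb p]
  rw [List.getElem_map]
  unfold pvCell
  by_cases hc : pvWrap n (es[p].1 - 1) = v ∨ pvWrap n (es[p].2 - 1) = v
  · rw [if_pos ((mem_pvColsOf n v es 0 p).2 ⟨p, hpe, by simp, hc⟩), if_pos hc]
  · rw [if_neg ?_, if_neg hc]
    · rw [List.getD_eq_getElem _ _ (by simpa using hpe), List.getElem_replicate]
    intro hmem
    rcases (mem_pvColsOf n v es 0 p).1 hmem with ⟨q, hq, hjq, hcq⟩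
    have hqp : q = p := by omega
    subst hqp
    exact hc hcq

-- ===== VERDICT (by name: the statement is the Claim_ definition above) =====
theorem get_incidence_matrix_nor_spec : Claim_equal_get_incidence_matrix_nor := by
  intro es n _ hPre
  unfold Spec_get_incidence_matrix_nor get_incidence_matrix_nor get_incidence_matrix_nor_alt
  have hA := pvFold_spec n es hPre (fun _ => []) 0 (fun _ => rfl)
  simp only [List.nil_append] at hA
  rw [show ((0:Nat):Int) = 0 from rfl] at hA
  rw [hA]
  have hB := pvIncFold_spec n es hPre (fun _ => []) 0
  rw [hB, List.map_map]
  refine List.map_congr_left (fun v hv => ?_)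
  simp only [Function.comp, List.nil_append]
  exact (pvRow_eq n es v).symm
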